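-- pv_equiv track=rewrite | github.com/andreikop/mit-scheme-gui | terminal.py | _isCommandComplete
-- ===== SOURCE A (Python) =====
-- def _isCommandComplete(text):
--     def skipQuotes(text):
--         quote = text[0]
--         text = text[1:]
--         endIndex = text.index(quote)
--         return text[endIndex:]
--     while text:
--         if text[0] in ('"', "'"):
--             try:
--                 text = skipQuotes(text)
--             except ValueError:
--                 return False
--         text = text[1:]
--     return True
-- ===== SOURCE B (Python) =====
-- def _isCommandComplete(text):
--     inQuote = None
--     for c in text:
--         if inQuote is None:
--             if c in ('"', "'"):
--                 inQuote = c
--         elif c == inQuote: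
--             inQuote = None
--     return inQuote is None
-- ===== Notes on version B (the rewrite author's own statement) =====
-- stated objective: faster
-- what changed: B replaces A's skip-ahead via substring .index and repeated slicing with a single forward pass maintaining an open-quote state variable.
import Mathlib
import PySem

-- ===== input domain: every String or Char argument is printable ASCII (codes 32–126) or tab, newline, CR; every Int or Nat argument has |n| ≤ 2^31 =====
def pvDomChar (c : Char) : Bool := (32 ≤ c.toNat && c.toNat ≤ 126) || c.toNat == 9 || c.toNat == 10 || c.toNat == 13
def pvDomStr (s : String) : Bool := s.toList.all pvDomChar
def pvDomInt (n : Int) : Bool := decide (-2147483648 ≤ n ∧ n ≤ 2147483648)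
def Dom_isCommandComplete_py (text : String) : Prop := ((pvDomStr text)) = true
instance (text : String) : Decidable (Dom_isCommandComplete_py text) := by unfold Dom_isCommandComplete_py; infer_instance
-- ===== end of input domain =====

-- B replaces A's skip-ahead via .index and slicing by a single forward pass with an
-- open-quote state variable; identical return value (objective: idiomatic).

-- ===== PORT A =====
-- A's while loop. On a quote char, skipQuotes is inlined: quote = text[0]; text = text[1:];
-- endIndex = text.index(quote) (ValueError = none → `return False`); return text[endIndex:];
-- then the loop's `text = text[1:]` drops the closing quote: (rest.drop i).drop 1.
def pvLoopA : List Char → Bool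
  | [] => true
  | c :: rest =>
    if c = '"' ∨ c = '\'' then
      match PySem.List.index? rest c with
      | none => false
      | some i => pvLoopA ((rest.drop i).drop 1)
    else
      pvLoopA rest
  termination_by l => l.length
  decreasing_by
    · simp only [List.length_drop, List.length_cons]; omega
    · simp

def isCommandComplete_py (text : String) : Bool := pvLoopA text.toList

-- ===== PORT B =====
def pvStepB (st : Option Char) (c : Char) : Option Char :=
  match st with
  | none => if c = '"' ∨ c = '\'' then some c else none
  | some q => if c = q then none else some q

def isCommandComplete_py_alt (text : String) : Bool :=
  (text.toList.foldl pvStepB none).isNone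

-- ===== PRECONDITION & SPEC =====
def Spec_isCommandComplete_py (text : String) (out : Bool) : Prop := out = isCommandComplete_py_alt text
instance (text : String) (out : Bool) : Decidable (Spec_isCommandComplete_py text out) := by unfold Spec_isCommandComplete_py; infer_instance

-- ===== CLAIM (what is proved, stated in full; the proofs are below) =====
def Claim_equal_isCommandComplete_py : Prop := ∀ (text : String), Dom_isCommandComplete_py text → Spec_isCommandComplete_py text (isCommandComplete_py text)

-- ===== LEMMAS AND PROOFS =====

-- folding from an open-quote state skips characters until the first occurrence of q
theorem foldl_stepB_some (l : List Char) (q : Char) :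
    l.foldl pvStepB (some q) =
      match PySem.List.index? l q with
      | none => some q
      | some i => (l.drop (i + 1)).foldl pvStepB none := by
  induction l with
  | nil => simp [PySem.List.index?_eq_idxOf?, List.idxOf?]
  | cons c rest ih =>
    by_cases hc : c = q
    · subst hc
      rw [PySem.List.index?_cons_self]
      simp [pvStepB]
    · rw [PySem.List.index?_cons_of_ne rest hc]
      have hs : pvStepB (some q) c = some q := by simp [pvStepB, hc]
      rw [List.foldl_cons, hs, ih]
      rcases PySem.List.index? rest q with _ | i <;> simp

theorem pvLoopA_eq (l : List Char) : pvLoopA l = (l.foldl pvStepB none).isNone := by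
  induction l using pvLoopA.induct with
  | case1 => simp [pvLoopA]
  | case2 c rest hq hi =>
    rw [pvLoopA, if_pos hq, hi]
    show false = _
    have hstep : pvStepB none c = some c := by
      rcases hq with h' | h' <;> simp [pvStepB, h']
    rw [List.foldl_cons, hstep, foldl_stepB_some, hi]
    simp
  | case3 c rest hq i hi ih =>
    rw [pvLoopA, if_pos hq, hi]
    show pvLoopA ((rest.drop i).drop 1) = _
    rw [ih]
    have hstep : pvStepB none c = some c := by
      rcases hq with h' | h' <;> simp [pvStepB, h']
    rw [List.foldl_cons, hstep, foldl_stepB_some, hi]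
    simp [List.drop_drop]
  | case4 c rest hq ih =>
    rw [pvLoopA]
    rw [if_neg hq, ih, List.foldl_cons]
    have hstep : pvStepB none c = none := by
      simp only [pvStepB]; rw [if_neg hq]
    rw [hstep]

-- ===== VERDICT (by name: the statement is the Claim_ definition above) =====
theorem isCommandComplete_py_spec : Claim_equal_isCommandComplete_py := by
  intro text _
  unfold Spec_isCommandComplete_py isCommandComplete_py isCommandComplete_py_alt
  exact pvLoopA_eq _
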